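-- pv_equiv track=rewrite | github.com/jetpackpony/video-modding | compile-videos/animation.py | get_legs_so_far
-- ===== SOURCE A (Python) =====
-- def get_legs_so_far(t, legs):
--     res = []
--     dur = 0
--     for leg in legs:
--         if dur <= t:
--             res.append(leg)
--         dur += leg[0]
--
--     return res
-- ===== SOURCE B (Python) =====
-- def get_legs_so_far(t, legs):
--     # Recursive "remaining budget" formulation: a leg is kept iff the budget
--     # left after subtracting all previous legs' durations is still >= 0.
--     if not legs:
--         return []
--     head, *rest = legs
--     tail = get_legs_so_far(t - head[0], rest)
--     return [head] + tail if t >= 0 else tail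
-- ===== Notes on version B (the rewrite author's own statement) =====
-- stated objective: alternative
-- what changed: Replaces the iterative running-duration accumulator compared against t by a structural recursion that threads a decreasing remaining budget (t minus the durations consumed so far) and keeps a leg iff that budget is nonnegative.
import Mathlib
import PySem

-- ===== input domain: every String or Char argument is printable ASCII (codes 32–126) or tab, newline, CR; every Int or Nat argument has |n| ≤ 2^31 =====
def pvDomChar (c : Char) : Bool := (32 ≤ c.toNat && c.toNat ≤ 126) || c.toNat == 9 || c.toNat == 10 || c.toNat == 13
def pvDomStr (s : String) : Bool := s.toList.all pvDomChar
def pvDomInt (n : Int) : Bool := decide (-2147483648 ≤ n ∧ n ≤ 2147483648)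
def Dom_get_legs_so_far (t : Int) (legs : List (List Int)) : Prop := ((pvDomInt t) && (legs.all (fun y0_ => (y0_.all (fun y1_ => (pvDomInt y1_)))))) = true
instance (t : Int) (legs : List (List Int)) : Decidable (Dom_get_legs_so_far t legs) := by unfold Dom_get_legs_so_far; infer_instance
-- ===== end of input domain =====

-- ===== PORT A =====
-- B replaces the running-duration accumulator by a recursion on a remaining budget; same O(n) cost.
-- leg[0]: exact via headD 0 since Pre_ guarantees every leg is nonempty (Python raises IndexError on an empty leg).
def get_legs_so_far (t : Int) (legs : List (List Int)) : List (List Int) :=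
  (legs.foldl
    (fun (st : List (List Int) × Int) leg =>
      (if st.2 ≤ t then st.1 ++ [leg] else st.1, st.2 + leg.headD 0))
    ([], 0)).1

-- ===== PORT B =====
-- Structural recursion threading the remaining budget t; head[0] is exact via headD 0 under Pre_.
def get_legs_so_far_alt (t : Int) (legs : List (List Int)) : List (List Int) :=
  match legs with
  | [] => []
  | head :: rest =>
    let tail := get_legs_so_far_alt (t - head.headD 0) rest
    if 0 ≤ t then head :: tail else tail

-- ===== PRECONDITION & SPEC =====
-- Pre_ excludes inputs containing an empty leg: there A raises IndexError on leg[0].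
def Pre_get_legs_so_far (t : Int) (legs : List (List Int)) : Prop :=
  ∀ leg ∈ legs, leg ≠ []
instance (t : Int) (legs : List (List Int)) : Decidable (Pre_get_legs_so_far t legs) := by
  unfold Pre_get_legs_so_far; infer_instance

def pvWitness_get_legs_so_far : Int × List (List Int) := (3, [[2, 7], [1], [5, 0]])

def Spec_get_legs_so_far (t : Int) (legs : List (List Int)) (out : List (List Int)) : Prop := out = get_legs_so_far_alt t legs
instance (t : Int) (legs : List (List Int)) (out : List (List Int)) : Decidable (Spec_get_legs_so_far t legs out) := by unfold Spec_get_legs_so_far; infer_instance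

-- ===== CLAIM (what is proved, stated in full; the proofs are below) =====
def Claim_equal_get_legs_so_far : Prop := ∀ (t : Int) (legs : List (List Int)), Dom_get_legs_so_far t legs → Pre_get_legs_so_far t legs → Spec_get_legs_so_far t legs (get_legs_so_far t legs)

-- ===== LEMMAS AND PROOFS =====

-- A's fold from state (res, dur) prepends res to B's result on the remaining budget t - dur.
theorem pv_fold_eq (t : Int) :
    ∀ (legs : List (List Int)) (dur : Int) (res : List (List Int)),
      (legs.foldl
        (fun (st : List (List Int) × Int) leg =>
          (if st.2 ≤ t then st.1 ++ [leg] else st.1, st.2 + leg.headD 0))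
        (res, dur)).1
      = res ++ get_legs_so_far_alt (t - dur) legs := by
  intro legs
  induction legs with
  | nil => intro dur res; simp [get_legs_so_far_alt]
  | cons a ls ih =>
    intro dur res
    have e : get_legs_so_far_alt (t - dur) (a :: ls)
        = if 0 ≤ t - dur then a :: get_legs_so_far_alt (t - dur - a.headD 0) ls
          else get_legs_so_far_alt (t - dur - a.headD 0) ls := rfl
    have h2 : t - (dur + a.headD 0) = t - dur - a.headD 0 := by ring
    rw [List.foldl_cons, ih, e, h2]
    by_cases hd : dur ≤ t
    · rw [if_pos hd, if_pos (by omega : (0:Int) ≤ t - dur)]; simp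
    · rw [if_neg hd, if_neg (by omega : ¬(0:Int) ≤ t - dur)]

-- ===== VERDICT (by name: the statement is the Claim_ definition above) =====
theorem get_legs_so_far_spec : Claim_equal_get_legs_so_far := by
  intro t legs _ _
  show _ = _
  unfold get_legs_so_far
  rw [pv_fold_eq, List.nil_append, sub_zero]
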